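-- pv_equiv track=rewrite | github.com/dennisgk/ox-laser-bluetooth | tf1_editor_ui/main.py | _word_spans
-- ===== SOURCE A (Python) =====
-- from typing import Any, Dict, List, Optional, Tuple
--
-- def _word_spans(text: str) -> List[Tuple[int, int, str]]:
--     spans: List[Tuple[int, int, str]] = []
--     i = 0
--     while i < len(text):
--         if text[i] == " ":
--             i += 1
--             continue
--         start = i
--         while i < len(text) and text[i] != " ":
--             i += 1
--         spans.append((start, i, text[start:i]))
--     return spans
-- ===== SOURCE B (Python) =====
-- def _word_spans(text):
--     spans = []
--     start = None
--     for i, ch in enumerate(text):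
--         if ch == " ":
--             if start is not None:
--                 spans.append((start, i, text[start:i]))
--                 start = None
--         elif start is None:
--             start = i
--     if start is not None:
--         spans.append((start, len(text), text[start:len(text)]))
--     return spans
-- ===== Notes on version B (the rewrite author's own statement) =====
-- stated objective: simpler
-- what changed: Replaced A's nested while-loops with manual index arithmetic by a single for-loop over enumerate(text) carrying an Option word-start state and a final flush after the loop.
import Mathlib
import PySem

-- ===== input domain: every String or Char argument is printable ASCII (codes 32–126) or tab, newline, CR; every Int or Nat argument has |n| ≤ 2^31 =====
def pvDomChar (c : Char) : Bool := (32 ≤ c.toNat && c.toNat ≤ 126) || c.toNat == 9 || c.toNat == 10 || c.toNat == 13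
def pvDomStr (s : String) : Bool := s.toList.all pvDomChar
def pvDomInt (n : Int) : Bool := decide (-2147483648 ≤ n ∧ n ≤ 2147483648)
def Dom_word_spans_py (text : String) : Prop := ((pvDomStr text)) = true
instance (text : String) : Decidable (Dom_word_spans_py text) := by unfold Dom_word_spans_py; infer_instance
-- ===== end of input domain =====

-- B replaces A's nested while-loop index scanning with a single enumerate pass keeping an
-- Option word-start accumulator (objective: simpler one-pass decomposition; same O(n) cost).

-- text[a:b] for Nat bounds with a ≤ b ≤ len: exactly Python's slice on that range (shared slice helper of both ports)
def pvSlice (cs : List Char) (a b : Nat) : String := String.ofList ((cs.drop a).take (b - a))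

-- ===== PORT A =====
-- inner 'while i < len(text) and text[i] != " ": i += 1' — returns the final i
def wsInner (cs : List Char) (i : Nat) : Nat :=
  if h : i < cs.length then
    if cs[i] ≠ ' ' then wsInner cs (i + 1) else i
  else i
termination_by cs.length - i

-- termination fact the outer loop's port needs: the inner loop strictly advances on a non-space
theorem wsInner_le (cs : List Char) : ∀ i, i ≤ wsInner cs i := by
  intro i
  induction hn : cs.length - i using Nat.strong_induction_on generalizing i with
  | _ n ih =>
    unfold wsInner
    split
    · split
      · have h1 : cs.length - (i + 1) < n := by omega
        have := ih _ h1 (i + 1) rfl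
        omega
      · exact Nat.le_refl i
    · exact Nat.le_refl i

theorem lt_wsInner (cs : List Char) (i : Nat) (h : i < cs.length) (hc : cs[i] ≠ ' ') :
    i < wsInner cs i := by
  rw [wsInner]
  simp only [h, dif_pos, hc, if_pos, ne_eq, not_false_eq_true]
  have := wsInner_le cs (i + 1)
  omega

-- outer 'while i < len(text): …' carrying the spans accumulator
def wsOuter (cs : List Char) (i : Nat) (spans : List (Int × Int × String)) :
    List (Int × Int × String) :=
  if h : i < cs.length then
    if cs[i] = ' ' then wsOuter cs (i + 1) spans
    else wsOuter cs (wsInner cs i)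
      (spans ++ [((i : Int), ((wsInner cs i) : Int), pvSlice cs i (wsInner cs i))])
  else spans
termination_by cs.length - i
decreasing_by
  · omega
  · have := lt_wsInner cs i h (by simpa using ‹¬ cs[i] = ' '›)
    omega

def word_spans_py (text : String) : List (Int × Int × String) :=
  wsOuter text.toList 0 []

-- ===== PORT B =====
-- one enumerate step of Source B's for-loop; state = (spans so far, Option start of the open word).
-- Python's enumerate indices are always the Nats 0..len-1, so List.zipIdx (value, index) is exact here.
def wsStep (cs : List Char) (st : List (Int × Int × String) × Option Nat) (p : Char × Nat) :
    List (Int × Int × String) × Option Nat :=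
  match st, p with
  | (spans, some s), (c, i) =>
    if c = ' ' then (spans ++ [((s : Int), (i : Int), pvSlice cs s i)], none)
    else (spans, some s)
  | (spans, none), (c, i) =>
    if c = ' ' then (spans, none) else (spans, some i)

def word_spans_py_alt (text : String) : List (Int × Int × String) :=
  let cs := text.toList
  match cs.zipIdx.foldl (wsStep cs) ([], none) with
  | (spans, none) => spans
  | (spans, some s) =>
      spans ++ [((s : Int), (cs.length : Int), pvSlice cs s cs.length)]

-- ===== PRECONDITION & SPEC =====
def Spec_word_spans_py (text : String) (out : List (Int × Int × String)) : Prop := out = word_spans_py_alt text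
instance (text : String) (out : List (Int × Int × String)) : Decidable (Spec_word_spans_py text out) := by unfold Spec_word_spans_py; infer_instance

-- ===== CLAIM (what is proved, stated in full; the proofs are below) =====
def Claim_equal_word_spans_py : Prop := ∀ (text : String), Dom_word_spans_py text → Spec_word_spans_py text (word_spans_py text)

-- ===== LEMMAS AND PROOFS =====

-- B's post-loop finalisation applied to a fold state
def pvFinish (cs : List Char) (st : List (Int × Int × String) × Option Nat) :
    List (Int × Int × String) :=
  match st with
  | (spans, none) => spans
  | (spans, some s) => spans ++ [((s : Int), (cs.length : Int), pvSlice cs s cs.length)]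

-- B's fold restricted to the suffix of the enumeration starting at index i
def pvFoldFrom (cs : List Char) (i : Nat) (st : List (Int × Int × String) × Option Nat) :
    List (Int × Int × String) × Option Nat :=
  (cs.zipIdx.drop i).foldl (wsStep cs) st

theorem pvFoldFrom_cons (cs : List Char) (i : Nat) (h : i < cs.length) (st) :
    pvFoldFrom cs i st = pvFoldFrom cs (i + 1) (wsStep cs st (cs[i], i)) := by
  unfold pvFoldFrom
  have hlen : i < cs.zipIdx.length := by simpa using h
  rw [List.drop_eq_getElem_cons hlen]
  simp [List.getElem_zipIdx]

theorem pvFoldFrom_end (cs : List Char) (i : Nat) (h : cs.length ≤ i) (st) :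
    pvFoldFrom cs i st = st := by
  unfold pvFoldFrom
  rw [List.drop_of_length_le (by simpa using h)]
  rfl

theorem wsInner_ge_len (cs : List Char) (i : Nat) (h : cs.length ≤ i) : wsInner cs i = i := by
  rw [wsInner]; simp [Nat.not_lt.mpr h]

-- main invariant: the suffix fold + finalisation computes exactly what A's loops compute,
-- both from the "between words" state (none) and from the "inside a word started at s" state (some s)
theorem pvMain (cs : List Char) : ∀ n i, cs.length - i ≤ n → i ≤ cs.length →
    (∀ spans, pvFinish cs (pvFoldFrom cs i (spans, none)) = wsOuter cs i spans) ∧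
    (∀ s spans, pvFinish cs (pvFoldFrom cs i (spans, some s)) =
      wsOuter cs (wsInner cs i)
        (spans ++ [((s : Int), ((wsInner cs i) : Int), pvSlice cs s (wsInner cs i))])) := by
  intro n
  induction n with
  | zero =>
    intro i hn hi
    have hi' : i = cs.length := by omega
    subst hi'
    constructor
    · intro spans
      rw [pvFoldFrom_end cs _ le_rfl, wsOuter]
      simp [pvFinish]
    · intro s spans
      rw [pvFoldFrom_end cs _ le_rfl, wsInner_ge_len cs _ le_rfl, wsOuter]
      simp [pvFinish]
  | succ n ih =>
    intro i hn hi
    by_cases h : i < cs.length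
    · have hstep := pvFoldFrom_cons cs i h
      have ihn := ih (i + 1) (by omega) (by omega)
      by_cases hc : cs[i] = ' '
      · constructor
        · intro spans
          rw [hstep, wsOuter]
          simp only [wsStep, hc, h, dif_pos, if_true]
          exact ihn.1 spans
        · intro s spans
          rw [hstep]
          simp only [wsStep, hc, if_true]
          have hinner : wsInner cs i = i := by rw [wsInner]; simp [h, hc]
          rw [ihn.1, hinner]
          conv_rhs => rw [wsOuter]
          simp [h, hc]
      · have hinner : wsInner cs i = wsInner cs (i + 1) := by
          rw [wsInner]; simp [h, hc]
        constructor
        · intro spans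
          rw [hstep]
          simp only [wsStep, hc, if_false]
          rw [ihn.2]
          conv_rhs => rw [wsOuter]
          simp [h, hc, ← hinner]
        · intro s spans
          rw [hstep]
          simp only [wsStep, hc, if_false]
          rw [ihn.2, hinner]
    · have hi' : i = cs.length := by omega
      subst hi'
      constructor
      · intro spans
        rw [pvFoldFrom_end cs _ le_rfl, wsOuter]
        simp [pvFinish]
      · intro s spans
        rw [pvFoldFrom_end cs _ le_rfl, wsInner_ge_len cs _ le_rfl, wsOuter]
        simp [pvFinish]

theorem word_spans_eq (text : String) : word_spans_py text = word_spans_py_alt text := by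
  have h := (pvMain text.toList (text.toList.length) 0 (by omega) (by omega)).1 []
  unfold word_spans_py word_spans_py_alt
  rw [← h]
  unfold pvFinish pvFoldFrom
  simp only [List.drop_zero]

-- ===== VERDICT (by name: the statement is the Claim_ definition above) =====
theorem word_spans_py_spec : Claim_equal_word_spans_py := by
  intro text _
  unfold Spec_word_spans_py
  exact word_spans_eq text
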